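-- pv_equiv track=rewrite | github.com/wdragondragon/JavaDependencyUML | root_resolver.py | resolve_roots
-- ===== SOURCE A (Python) =====
-- def resolve_roots(roots, all_classes):
--     """
--     roots: 用户配置的 root（类 or 包）
--     all_classes: 项目中所有已知类 FQN
--     """
--     resolved = set()
--
--     for r in roots:
--         if r in all_classes:
--             # 精确类
--             resolved.add(r)
--         else:
--             # 当作包前缀
--             prefix = r + "."
--             matched = {c for c in all_classes if c.startswith(prefix)}
--             resolved |= matched
--
--     return resolved
-- ===== SOURCE B (Python) =====
-- def resolve_roots(roots, all_classes):
--     """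
--     roots: 用户配置的 root（类 or 包）
--     all_classes: 项目中所有已知类 FQN
--     """
--     class_set = set(all_classes)
--     # index: package prefix (cut at every '.') -> classes under it, in list order
--     pkg_index = {}
--     for c in all_classes:
--         for i, ch in enumerate(c):
--             if ch == '.':
--                 pkg_index.setdefault(c[:i], []).append(c)
--
--     resolved = set()
--     for r in roots:
--         if r in class_set:
--             resolved.add(r)
--         else:
--             resolved.update(pkg_index.get(r, []))
--     return resolved
-- ===== Notes on version B (the rewrite author's own statement) =====
-- stated objective: faster
-- what changed: B builds, in one pass over all_classes, a hash set of class names and a dict index mapping each package prefix (the FQN cut at every dot) to its classes, so each root is resolved by two O(1) lookups instead of scanning all_classes with startswith.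
import Mathlib
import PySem

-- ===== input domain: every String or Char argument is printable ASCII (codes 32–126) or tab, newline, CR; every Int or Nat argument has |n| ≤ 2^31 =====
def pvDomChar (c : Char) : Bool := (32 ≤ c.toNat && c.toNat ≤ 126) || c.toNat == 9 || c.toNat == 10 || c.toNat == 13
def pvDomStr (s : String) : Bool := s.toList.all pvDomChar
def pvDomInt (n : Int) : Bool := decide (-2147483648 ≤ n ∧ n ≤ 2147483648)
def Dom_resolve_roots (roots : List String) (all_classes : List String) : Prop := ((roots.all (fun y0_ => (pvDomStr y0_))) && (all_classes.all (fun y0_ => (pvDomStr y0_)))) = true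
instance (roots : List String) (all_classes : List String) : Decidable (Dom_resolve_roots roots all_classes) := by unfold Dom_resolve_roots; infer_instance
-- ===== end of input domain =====

-- B replaces A's per-root scan of all_classes by a dictionary index from package prefixes
-- to their classes, built in one pass over all_classes (objective: faster).


-- ===== PORT A =====
def resolve_roots (roots : List String) (all_classes : List String) : List String :=
  roots.foldl (fun resolved r =>
    if all_classes.contains r then
      PySem.Set.add resolved r
    else
      PySem.Set.union resolved
        (PySem.Set.ofList (all_classes.filter (fun c => PySem.Str.startswith c (r ++ "."))))) PySem.Set.empty

-- ===== PORT B =====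
-- inner loop of the index build: "for i, ch in enumerate(c): if ch == '.': pkg_index.setdefault(c[:i], []).append(c)"
-- (the slice c[:i] with 0 ≤ i < len(c) is exactly List.take i on the characters — exact here;
--  setdefault-then-append is ported as insert of (getD key []) ++ [c], which is what it does to the dict)
def pvAddPrefixes (d : PySem.Dict String (List String)) (c : String) : PySem.Dict String (List String) :=
  (PySem.List.enumerate c.toList).foldl (fun d' p =>
    if p.2 == '.' then
      (d'.insert (String.ofList (c.toList.take p.1.toNat))
        ((d'.getD (String.ofList (c.toList.take p.1.toNat)) []) ++ [c]))
    else d') d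

def pvBuildIndex (all_classes : List String) : PySem.Dict String (List String) :=
  all_classes.foldl pvAddPrefixes PySem.Dict.empty

def resolve_roots_alt (roots : List String) (all_classes : List String) : List String :=
  let class_set := PySem.Set.ofList all_classes
  let pkg_index := pvBuildIndex all_classes
  roots.foldl (fun resolved r =>
    if PySem.Set.contains class_set r then
      PySem.Set.add resolved r
    else
      PySem.Set.update resolved (pkg_index.getD r [])) PySem.Set.empty

-- ===== PRECONDITION & SPEC =====
def Spec_resolve_roots (roots : List String) (all_classes : List String) (out : List String) : Prop := out = resolve_roots_alt roots all_classes
instance (roots : List String) (all_classes : List String) (out : List String) : Decidable (Spec_resolve_roots roots all_classes out) := by unfold Spec_resolve_roots; infer_instance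

-- ===== CLAIM (what is proved, stated in full; the proofs are below) =====
def Claim_equal_resolve_roots : Prop := ∀ (roots : List String) (all_classes : List String), Dom_resolve_roots roots all_classes → Spec_resolve_roots roots all_classes (resolve_roots roots all_classes)

-- ===== LEMMAS AND PROOFS =====

-- Set.add of an element already present / absent, lifted through Set.update
theorem pv_update_add {α : Type} [BEq α] [LawfulBEq α] (s a : PySem.Set α) (x : α) :
    PySem.Set.update s (PySem.Set.add a x) = PySem.Set.add (PySem.Set.update s a) x := by
  by_cases h : x ∈ a
  · have h1 : PySem.Set.add a x = a := by
      simp [PySem.Set.add, PySem.Set.contains, h]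
    have h2 : PySem.Set.add (PySem.Set.update s a) x = PySem.Set.update s a := by
      simp [PySem.Set.add, PySem.Set.contains,
        (PySem.Set.mem_update s a x).mpr (Or.inr h)]
    rw [h1, h2]
  · have h1 : PySem.Set.add a x = a ++ [x] := by
      simp [PySem.Set.add, PySem.Set.contains, h]
    rw [h1, PySem.Set.update, List.foldl_append]
    rfl

theorem pv_update_foldl {α : Type} [BEq α] [LawfulBEq α] (l : List α) (s a : PySem.Set α) :
    PySem.Set.update s (l.foldl PySem.Set.add a) = PySem.Set.update (PySem.Set.update s a) l := by
  induction l generalizing a with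
  | nil => rfl
  | cons x t ih =>
      show PySem.Set.update s (t.foldl PySem.Set.add (PySem.Set.add a x)) = _
      rw [ih, pv_update_add]
      rfl

-- 'resolved.update(l)' ignores duplicates: updating with set(l) is updating with l
theorem pv_update_ofList {α : Type} [BEq α] [LawfulBEq α] (l : List α) (s : PySem.Set α) :
    PySem.Set.update s (PySem.Set.ofList l) = PySem.Set.update s l := by
  rw [PySem.Set.ofList, pv_update_foldl]
  rfl

-- the match condition moves one character at a time through the index-build loop
theorem pv_cond_step (r pre : List Char) (ch : Char) (cs : List Char)
    (hne : ¬ (ch = '.' ∧ pre = r)) :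
    ((pre ++ [ch]) <+: r ∧ (r ++ ['.']) <+: (pre ++ [ch] ++ cs)) ↔
      (pre <+: r ∧ (r ++ ['.']) <+: (pre ++ ch :: cs)) := by
  constructor
  · rintro ⟨h1, h2⟩
    exact ⟨((pre.prefix_append [ch]).trans h1), by simpa using h2⟩
  · rintro ⟨h1, h2⟩
    obtain ⟨u, hu⟩ := h1
    obtain ⟨v, hv⟩ := h2
    subst hu
    simp only [List.append_assoc] at hv
    replace hv := List.append_cancel_left hv
    match u, hv with
    | [], hv =>
        exact absurd ⟨by simpa using congrArg (·.head?) hv.symm, by simp⟩ hne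
    | ch' :: u', hv =>
        have hch : ch = ch' := by simpa using congrArg (·.head?) hv.symm
        subst hch
        have hcs : u' ++ '.' :: v = cs := by simpa using hv
        exact ⟨⟨u', by simp⟩, ⟨v, by simp [← hcs]⟩⟩

-- what the inner index-build loop, resumed after a processed prefix 'pre' of c, does to the entry of a fixed key r
theorem pv_inner (r c : String) : ∀ (cs pre : List Char) (d : PySem.Dict String (List String)),
    c.toList = pre ++ cs →
    ((PySem.List.enumerate cs (pre.length : Int)).foldl (fun d' p =>
        if p.2 == '.' then
          (d'.insert (String.ofList (c.toList.take p.1.toNat))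
            ((d'.getD (String.ofList (c.toList.take p.1.toNat)) []) ++ [c]))
        else d') d).getD r [] =
      d.getD r [] ++ (if pre <+: r.toList ∧ (r.toList ++ ['.']) <+: (pre ++ cs) then [c] else []) := by
  intro cs
  induction cs with
  | nil =>
      intro pre d hc
      rw [if_neg]
      · simp [PySem.List.enumerate]
      · rintro ⟨h1, h2⟩
        have := h1.length_le
        have := h2.length_le
        simp at *; omega
  | cons ch cs ih =>
      intro pre d hc
      rw [PySem.List.enumerate_cons, List.foldl_cons]
      have htake : c.toList.take ((pre.length : Int)).toNat = pre := by
        simp [hc]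
      have harith : (pre.length : Int) + 1 = ((pre ++ [ch]).length : Int) := by simp
      have hc' : c.toList = (pre ++ [ch]) ++ cs := by simpa using hc
      by_cases hmatch : ch = '.' ∧ pre = r.toList
      · obtain ⟨h₁, h₂⟩ := hmatch
        subst h₁; subst h₂
        simp only [beq_self_eq_true, if_true, htake]
        rw [harith, ih (r.toList ++ ['.']) _ hc']
        rw [if_neg (by rintro ⟨h1, _⟩; have := h1.length_le; simp at this)]
        rw [if_pos ⟨List.prefix_rfl, ⟨cs, by simp⟩⟩]
        simp [String.ofList_toList, PySem.Dict.getD_insert_self]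
      · have hcond := pv_cond_step r.toList pre ch cs hmatch
        by_cases hdot : ch = '.'
        · subst hdot
          simp only [beq_self_eq_true, if_true, htake]
          rw [harith, ih (pre ++ ['.']) _ hc']
          have hkey : String.ofList pre ≠ r := by
            intro h
            exact hmatch ⟨rfl, by rw [← h]; simp⟩
          rw [PySem.Dict.getD_insert, if_neg (fun h => hkey h.symm)]
          rcases iff_iff_and_or_not_and_not.mp hcond with ⟨ha, hb⟩ | ⟨ha, hb⟩
          · rw [if_pos ha, if_pos hb]
          · rw [if_neg ha, if_neg hb]
        · have hbeq : (ch == '.') = false := by simpa using hdot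
          simp only [hbeq, Bool.false_eq_true, if_false]
          rw [harith, ih (pre ++ [ch]) _ hc']
          rcases iff_iff_and_or_not_and_not.mp hcond with ⟨ha, hb⟩ | ⟨ha, hb⟩
          · rw [if_pos ha, if_pos hb]
          · rw [if_neg ha, if_neg hb]

-- one class contributes itself to the entry of key r iff it lies under package r
theorem pvAddPrefixes_getD (r c : String) (d : PySem.Dict String (List String)) :
    (pvAddPrefixes d c).getD r [] =
      d.getD r [] ++ (if PySem.Str.startswith c (r ++ ".") then [c] else []) := by
  have hdot : ("." : String).toList = ['.'] := rfl
  have h := pv_inner r c c.toList [] d (by simp)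
  have hstart : (PySem.Str.startswith c (r ++ ".") = true) ↔
      (([] : List Char) <+: r.toList ∧ r.toList ++ ['.'] <+: ([] : List Char) ++ c.toList) := by
    simp [PySem.Str.startswith, PySem.Chars.startswith, List.isPrefixOf_iff_prefix,
      String.toList_append, hdot]
  rw [pvAddPrefixes]
  rw [show ((List.nil (α := Char)).length : Int) = 0 by simp] at h
  rw [h]
  by_cases hs : PySem.Str.startswith c (r ++ ".")
  · rw [if_pos hs, if_pos (hstart.mp hs)]
  · rw [if_neg hs, if_neg (fun hc => hs (hstart.mpr hc))]

theorem pvBuildIndex_getD_gen (r : String) (l : List String) :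
    ∀ d : PySem.Dict String (List String),
    (l.foldl pvAddPrefixes d).getD r [] =
      d.getD r [] ++ l.filter (fun c => PySem.Str.startswith c (r ++ ".")) := by
  induction l with
  | nil => intro d; simp
  | cons c t ih =>
      intro d
      rw [List.foldl_cons, ih, pvAddPrefixes_getD, List.filter_cons]
      split <;> simp

-- the index at key r holds exactly the classes with package prefix r, in all_classes order
theorem pvBuildIndex_getD (r : String) (all_classes : List String) :
    (pvBuildIndex all_classes).getD r [] =
      all_classes.filter (fun c => PySem.Str.startswith c (r ++ ".")) := by
  rw [pvBuildIndex, pvBuildIndex_getD_gen]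
  simp [PySem.Dict.empty, PySem.Dict.getD, PySem.Dict.get?]

-- ===== VERDICT (by name: the statement is the Claim_ definition above) =====
theorem resolve_roots_spec : Claim_equal_resolve_roots := by
  unfold Claim_equal_resolve_roots
  intro roots all_classes _
  unfold Spec_resolve_roots resolve_roots resolve_roots_alt
  apply PySem.List.foldl_congr_mem
  intro acc r _
  have hcont : PySem.Set.contains (PySem.Set.ofList all_classes) r = all_classes.contains r := by
    simp [PySem.Set.contains, PySem.Set.mem_ofList]
  rw [hcont]
  by_cases h : all_classes.contains r
  · rw [if_pos h, if_pos h]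
  · rw [if_neg h, if_neg h, pvBuildIndex_getD, PySem.Set.union, pv_update_ofList]
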